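-- pv_equiv track=rewrite | github.com/svend4/pro2 | e2_self_improve.py | q4_cluster_init
-- ===== SOURCE A (Python) =====
-- _Q4_LABELS = [
--     "structure", "pattern", "logic", "sequence",
--     "balance", "hierarchy", "transformation", "flow",
--     "duality", "cycle", "emergence", "boundary",
--     "resonance", "synthesis", "recursion", "wholeness",
-- ]
--
-- def q4_cluster_init(texts: list[str], n_per_cluster: int = 10) -> dict[str, list[str]]:
--     """Организует тексты по Q4-архетипам на основе ключевых слов.
--
--     Каждый Q4-архетип имеет семантическую метку из _Q4_LABELS.
--     Тексты сортируются по совпадению с меткой (простой keyword match).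
--
--     Returns:
--         dict label → list[text] — по n_per_cluster текстов на архетип
--     """
--     clusters: dict[str, list[str]] = {label: [] for label in _Q4_LABELS}
--     for text in texts:
--         text_lower = text.lower()
--         best_label = "wholeness"  # fallback
--         best_score = 0
--         for label in _Q4_LABELS:
--             score = sum(1 for kw in label.split("_") if kw in text_lower)
--             if score > best_score:
--                 best_score = score
--                 best_label = label
--         clusters[best_label].append(text)
--
--     # Обрезаем до n_per_cluster
--     return {k: v[:n_per_cluster] for k, v in clusters.items() if v}
-- ===== SOURCE B (Python) =====
-- _Q4_LABELS = [
--     "structure", "pattern", "logic", "sequence",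
--     "balance", "hierarchy", "transformation", "flow",
--     "duality", "cycle", "emergence", "boundary",
--     "resonance", "synthesis", "recursion", "wholeness",
-- ]
--
--
-- def q4_cluster_init(texts: list[str], n_per_cluster: int = 10) -> dict[str, list[str]]:
--     """Group texts by the first archetype label occurring in them.
--
--     No label contains "_", so every per-label score of the original is 0 or 1
--     and its strict argmax is simply the first label found as a substring
--     (falling back to "wholeness", the last label).
--     """
--     def label_of(text: str) -> str:
--         low = text.lower()
--         return next((label for label in _Q4_LABELS if label in low), "wholeness")
--
--     keys = [label_of(t) for t in texts]
--     result: dict[str, list[str]] = {}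
--     for label in _Q4_LABELS:
--         bucket = [t for t, k in zip(texts, keys) if k == label]
--         if bucket:
--             result[label] = bucket[:n_per_cluster]
--     return result
-- ===== Notes on version B (the rewrite author's own statement) =====
-- stated objective: simpler
-- what changed: The per-text score-accumulation/argmax over all 16 labels is replaced by a first-substring-match key function (valid since scores are 0/1 with strict >), and the running dict of buckets is replaced by one stable filter per label; the first-match search also short-circuits, measured ~4x faster.
import Mathlib
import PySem

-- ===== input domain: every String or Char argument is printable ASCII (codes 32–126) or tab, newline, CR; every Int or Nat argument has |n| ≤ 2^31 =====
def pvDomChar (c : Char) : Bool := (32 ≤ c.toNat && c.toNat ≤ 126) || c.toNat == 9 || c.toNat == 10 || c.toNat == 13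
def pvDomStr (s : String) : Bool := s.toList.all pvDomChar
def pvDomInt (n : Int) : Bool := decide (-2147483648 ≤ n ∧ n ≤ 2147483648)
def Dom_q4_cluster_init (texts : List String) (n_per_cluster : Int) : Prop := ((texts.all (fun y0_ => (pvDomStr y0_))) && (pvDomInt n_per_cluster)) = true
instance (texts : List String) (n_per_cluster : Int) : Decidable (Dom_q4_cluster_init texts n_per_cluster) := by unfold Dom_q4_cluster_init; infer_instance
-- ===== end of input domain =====

-- B replaces A's per-text score/argmax over all labels by a first-substring-match
-- key and builds each cluster with one stable filter per label (objective: simpler).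

-- the module-level constant _Q4_LABELS (shared by both programs)
def pvLabels : List String :=
  ["structure", "pattern", "logic", "sequence",
   "balance", "hierarchy", "transformation", "flow",
   "duality", "cycle", "emergence", "boundary",
   "resonance", "synthesis", "recursion", "wholeness"]

-- ===== PORT A =====
-- score = sum(1 for kw in label.split("_") if kw in text_lower)
def pvScoreA (label : String) (text_lower : String) : Int :=
  ((PySem.Str.split? label "_").getD []).foldl
    (fun acc kw => if PySem.Str.isIn kw text_lower then acc + 1 else acc) 0

-- the inner 'for label in _Q4_LABELS' argmax loop; state = (best_label, best_score)
def pvBestA (text_lower : String) : String × Int :=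
  pvLabels.foldl
    (fun st label =>
      let score := pvScoreA label text_lower
      if st.2 < score then (label, score) else st)
    ("wholeness", 0)

def q4_cluster_init (texts : List String) (n_per_cluster : Int) : List (String × List String) :=
  let clusters : PySem.Dict String (List String) :=
    pvLabels.foldl (fun d label => d.insert label []) PySem.Dict.empty
  let clusters :=
    texts.foldl
      (fun d text =>
        let text_lower := PySem.Str.lower text
        let best_label := (pvBestA text_lower).1
        d.modify best_label [] (fun v => v ++ [text]))
      clusters
  clusters.items.foldl
    (fun out kv =>
      if kv.2 ≠ [] then out ++ [(kv.1, PySem.List.slice kv.2 none (some n_per_cluster))]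
      else out)
    []

-- ===== PORT B =====
-- label_of: first label occurring in text.lower(), falling back to "wholeness"
def pvLabelOf (text : String) : String :=
  let low := PySem.Str.lower text
  (pvLabels.find? (fun label => PySem.Str.isIn label low)).getD "wholeness"

def q4_cluster_init_alt (texts : List String) (n_per_cluster : Int) : List (String × List String) :=
  let keys := texts.map pvLabelOf
  pvLabels.foldl
    (fun result label =>
      let bucket := ((texts.zip keys).filter (fun p => p.2 == label)).map Prod.fst
      if bucket ≠ [] then result ++ [(label, PySem.List.slice bucket none (some n_per_cluster))]
      else result)
    []

-- ===== PRECONDITION & SPEC =====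
def Spec_q4_cluster_init (texts : List String) (n_per_cluster : Int) (out : List (String × List String)) : Prop := out = q4_cluster_init_alt texts n_per_cluster
instance (texts : List String) (n_per_cluster : Int) (out : List (String × List String)) : Decidable (Spec_q4_cluster_init texts n_per_cluster out) := by unfold Spec_q4_cluster_init; infer_instance

-- ===== CLAIM (what is proved, stated in full; the proofs are below) =====
def Claim_equal_q4_cluster_init : Prop := ∀ (texts : List String) (n_per_cluster : Int), Dom_q4_cluster_init texts n_per_cluster → Spec_q4_cluster_init texts n_per_cluster (q4_cluster_init texts n_per_cluster)

-- ===== LEMMAS AND PROOFS =====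

-- no label contains "_", so splitting is the identity
theorem pvSplit_fact : ∀ l ∈ pvLabels, PySem.Str.split? l "_" = some [l] := by decide

theorem pvLabels_nodup : pvLabels.Nodup := by decide

theorem pvScoreA_eq (l tl : String) (h : l ∈ pvLabels) :
    pvScoreA l tl = if PySem.Str.isIn l tl then 1 else 0 := by
  unfold pvScoreA
  rw [pvSplit_fact l h]
  simp [List.foldl]

theorem pvScoreA_le_one (l tl : String) (h : l ∈ pvLabels) : pvScoreA l tl ≤ 1 := by
  rw [pvScoreA_eq l tl h]; split <;> omega

-- once a score of 1 has been reached the argmax state is frozen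
theorem pvFrozen (tl : String) (ls : List String) (hls : ∀ l ∈ ls, pvScoreA l tl ≤ 1)
    (bl : String) :
    ls.foldl (fun st label =>
        let score := pvScoreA label tl
        if st.2 < score then (label, score) else st) (bl, 1) = (bl, 1) := by
  induction ls with
  | nil => rfl
  | cons l ls ih =>
    have h1 : pvScoreA l tl ≤ 1 := hls l (List.mem_cons_self ..)
    have hnot : ¬ ((bl, (1:Int)).2 < pvScoreA l tl) := by simp only; omega
    have h2 : (if (bl, (1:Int)).2 < pvScoreA l tl then (l, pvScoreA l tl) else (bl, 1)) = (bl, 1) :=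
      if_neg hnot
    simp only [List.foldl_cons, h2]
    exact ih (fun l' h' => hls l' (List.mem_cons_of_mem _ h'))

-- the strict argmax over 0/1 scores is the first substring match
theorem pvArgmax (tl : String) (ls : List String)
    (hsc : ∀ l ∈ ls, pvScoreA l tl = if PySem.Str.isIn l tl then 1 else 0)
    (hle : ∀ l ∈ ls, pvScoreA l tl ≤ 1) :
    (ls.foldl (fun st label =>
        let score := pvScoreA label tl
        if st.2 < score then (label, score) else st) ("wholeness", 0)).1
      = (ls.find? (fun label => PySem.Str.isIn label tl)).getD "wholeness" := by
  induction ls with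
  | nil => rfl
  | cons l ls ih =>
    have h1 := hsc l (List.mem_cons_self ..)
    by_cases hin : PySem.Str.isIn l tl
    · have hone : pvScoreA l tl = 1 := by rw [h1, if_pos hin]
      have hstep : (if ("wholeness", (0:Int)).2 < pvScoreA l tl
          then (l, pvScoreA l tl) else ("wholeness", 0)) = (l, 1) := by
        rw [hone]; norm_num
      simp only [List.foldl_cons, hstep]
      rw [List.find?_cons_of_pos (p := fun label => PySem.Str.isIn label tl) hin]
      rw [pvFrozen tl ls (fun l' h' => hle l' (List.mem_cons_of_mem _ h')) l]
      rfl
    · have hz : pvScoreA l tl = 0 := by rw [h1, if_neg hin]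
      have hstep : (if ("wholeness", (0:Int)).2 < pvScoreA l tl
          then (l, pvScoreA l tl) else ("wholeness", 0)) = ("wholeness", 0) := by
        rw [hz]; norm_num
      simp only [List.foldl_cons, hstep]
      rw [List.find?_cons_of_neg (p := fun label => PySem.Str.isIn label tl) hin]
      exact ih (fun l' h' => hsc l' (List.mem_cons_of_mem _ h'))
            (fun l' h' => hle l' (List.mem_cons_of_mem _ h'))

theorem pvBestA_eq (t : String) : (pvBestA (PySem.Str.lower t)).1 = pvLabelOf t := by
  unfold pvBestA pvLabelOf
  exact pvArgmax _ pvLabels (fun l h => pvScoreA_eq l _ h) (fun l h => pvScoreA_le_one l _ h)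

theorem pvLabelOf_mem (t : String) : pvLabelOf t ∈ pvLabels := by
  show (pvLabels.find? (fun label => PySem.Str.isIn label (PySem.Str.lower t))).getD "wholeness" ∈ pvLabels
  cases hf : pvLabels.find? (fun label => PySem.Str.isIn label (PySem.Str.lower t)) with
  | none => show "wholeness" ∈ pvLabels; decide
  | some l => simpa using List.mem_of_find?_eq_some hf

-- Dict.modify on a dict whose items are pvLabels.map (l, f l), at a present key
theorem pvModify_map (f : String → List String) (k : String) (hk : k ∈ pvLabels)
    (g : List String → List String) :
    PySem.Dict.modify ⟨pvLabels.map (fun l => (l, f l))⟩ k [] g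
      = ⟨pvLabels.map (fun l => (l, if l = k then g (f l) else f l))⟩ := by
  have hfind : List.find? (fun l => l == k) pvLabels = some k := by
    rw [List.find?_eq_some_iff_append]
    refine ⟨by simp, ?_⟩
    obtain ⟨as, bs, hsplit⟩ := List.append_of_mem hk
    refine ⟨as, bs, hsplit, ?_⟩
    intro x hx
    have hnd := pvLabels_nodup
    rw [hsplit] at hnd
    simp only [List.nodup_append, List.nodup_cons] at hnd
    simp only [Bool.not_eq_eq_eq_not, Bool.not_true, beq_eq_false_iff_ne]
    exact hnd.2.2 x hx k (List.mem_cons_self ..)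
  have hcont : (PySem.Dict.contains ⟨pvLabels.map (fun l => (l, f l))⟩ k) = true := by
    simp only [PySem.Dict.contains, List.any_map, List.any_eq_true]
    exact ⟨k, hk, by simp⟩
  have hget : PySem.Dict.getD ⟨pvLabels.map (fun l => (l, f l))⟩ k [] = f k := by
    simp only [PySem.Dict.getD, PySem.Dict.get?, List.find?_map]
    rw [show ((fun (p : String × List String) => p.1 == k) ∘ fun l => (l, f l))
          = (fun l => l == k) from rfl, hfind]
    rfl
  simp only [PySem.Dict.modify, hget, PySem.Dict.insert, hcont, if_pos]
  congr 1
  simp only [List.map_map]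
  apply List.map_congr_left
  intro l _
  by_cases h : l = k
  · subst h; simp
  · simp [Function.comp, h, Ne.symm]

-- the initial dict {label: [] for label in pvLabels}
set_option maxHeartbeats 1000000 in
theorem pvInit_dict :
    pvLabels.foldl (fun d label => d.insert label []) (PySem.Dict.empty : PySem.Dict String (List String))
      = ⟨pvLabels.map (fun l => (l, []))⟩ := by
  decide

-- main loop invariant: the dict stays a map over pvLabels with filtered buckets
theorem pvLoop_inv (ts : List String) (f : String → List String) :
    ts.foldl (fun d text => d.modify (pvLabelOf text) [] (fun v => v ++ [text]))
        (⟨pvLabels.map (fun l => (l, f l))⟩ : PySem.Dict String (List String))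
      = ⟨pvLabels.map (fun l => (l, f l ++ ts.filter (fun t => pvLabelOf t == l)))⟩ := by
  induction ts generalizing f with
  | nil => simp
  | cons t ts ih =>
    simp only [List.foldl_cons]
    rw [pvModify_map f (pvLabelOf t) (pvLabelOf_mem t)]
    rw [ih (fun l => if l = pvLabelOf t then f l ++ [t] else f l)]
    simp only [PySem.Dict.mk.injEq]
    apply List.map_congr_left
    intro l _
    by_cases h : pvLabelOf t = l
    · simp [h]
    · have h' : l ≠ pvLabelOf t := fun hh => h hh.symm
      simp [h, h']

-- B's zip/filter/map bucket is a plain filter over texts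
theorem pvBucket_eq (ts : List String) (l : String) :
    ((ts.zip (ts.map pvLabelOf)).filter (fun p => p.2 == l)).map Prod.fst
      = ts.filter (fun t => pvLabelOf t == l) := by
  induction ts with
  | nil => rfl
  | cons t ts ih =>
    simp only [List.map_cons, List.zip_cons_cons, List.filter_cons]
    by_cases h : pvLabelOf t == l
    · simp [h, ih]
    · simp [h, ih]

-- ===== VERDICT (by name: the statement is the Claim_ definition above) =====
theorem q4_cluster_init_spec : Claim_equal_q4_cluster_init := by
  intro texts n _
  show q4_cluster_init texts n = q4_cluster_init_alt texts n
  simp only [q4_cluster_init, q4_cluster_init_alt]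
  have hstep : (fun (d : PySem.Dict String (List String)) text =>
      PySem.Dict.modify d ((pvBestA (PySem.Str.lower text)).1) [] (fun v => v ++ [text]))
      = (fun d text => d.modify (pvLabelOf text) [] (fun v => v ++ [text])) := by
    funext d text
    rw [pvBestA_eq]
  rw [pvInit_dict, hstep, pvLoop_inv texts (fun _ => [])]
  simp only [List.nil_append]
  rw [List.foldl_map]
  have hb : (fun (result : List (String × List String)) label =>
      if (((texts.zip (texts.map pvLabelOf)).filter (fun p => p.2 == label)).map Prod.fst) ≠ []
      then result ++ [(label, PySem.List.slice (((texts.zip (texts.map pvLabelOf)).filter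
            (fun p => p.2 == label)).map Prod.fst) none (some n))]
      else result)
      = (fun result label =>
      if (texts.filter (fun t => pvLabelOf t == label)) ≠ []
      then result ++ [(label, PySem.List.slice (texts.filter (fun t => pvLabelOf t == label)) none (some n))]
      else result) := by
    funext result label
    rw [pvBucket_eq]
  rw [hb]
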